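-- pv_equiv track=rewrite | github.com/navkant/ds_algo_day_wise | day_11_intro_to_hashing_2/4_element_sum.py | four_element_sum
-- ===== SOURCE A (Python) =====
-- from typing import List
--
-- def four_element_sum(A: List[int]) -> List[int]:
--     n = len(A)
--     hash_map = dict()
--     result = []
--
--     for i in range(n):
--         for j in range(i+1, n):
--             temp = A[i] + A[j]
--             if temp not in hash_map:
--                 hash_map[temp] = [i, j]
--             else:
--                 if i not in hash_map[temp] and j not in hash_map[temp] and len(hash_map[temp]) <= 2:
--                     hash_map[temp].extend([i, j])
--                 else:
--                     pass
--
--                 if len(hash_map[temp]) == 4: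
--                     if not result:
--                         result = hash_map[temp]
--                     else:
--                         temp_result = hash_map[temp]
--                         for k in range(4):
--                             if temp_result[k] < result[k]:
--                                 result = temp_result
--                             elif temp_result[k] > result[k]:
--                                 break
--                             else:
--                                 continue
--                 else:
--                     continue
--
--     return result
-- ===== SOURCE B (Python) =====
-- from typing import List
--
--
-- def four_element_sum(A: List[int]) -> List[int]:
--     n = len(A)
--     pairs = {}
--     for i in range(n):
--         for j in range(i + 1, n):
--             pairs.setdefault(A[i] + A[j], []).append((i, j))
--     candidates = []
--     for plist in pairs.values():
--         i0, j0 = plist[0]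
--         for i1, j1 in plist[1:]:
--             if i1 != i0 and i1 != j0 and j1 != i0 and j1 != j0:
--                 candidates.append([i0, j0, i1, j1])
--                 break
--     return min(candidates) if candidates else []
-- ===== Notes on version B (the rewrite author's own statement) =====
-- stated objective: alternative
-- what changed: A interleaves hash-map building, pair-list extension and a manual 4-step lexicographic comparison loop in one nested pass; B first groups all (i,j) index pairs by pair-sum in a dict, then per sum anchors on the first pair, scans for the first index-disjoint pair to form a candidate, and returns min(candidates) using Python's built-in list comparison.
import Mathlib
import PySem

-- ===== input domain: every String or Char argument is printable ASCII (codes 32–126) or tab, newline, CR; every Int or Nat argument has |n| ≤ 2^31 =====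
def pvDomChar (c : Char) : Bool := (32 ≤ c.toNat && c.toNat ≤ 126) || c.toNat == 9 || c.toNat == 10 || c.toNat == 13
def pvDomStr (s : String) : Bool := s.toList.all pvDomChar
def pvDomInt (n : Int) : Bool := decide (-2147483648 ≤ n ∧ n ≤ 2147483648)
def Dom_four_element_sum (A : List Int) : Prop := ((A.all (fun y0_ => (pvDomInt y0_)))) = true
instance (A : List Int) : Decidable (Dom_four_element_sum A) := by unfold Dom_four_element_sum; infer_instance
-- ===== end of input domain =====

-- B separates A's single interleaved pass into two phases (group index pairs by pair-sum, then per sum take the first pair disjoint from the anchor and return min of the candidates); same O(n^2) asymptotics.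

-- ===== PORT A =====
-- the inner 'for k in range(4)' comparison loop of A (result replacement, break, continue)
def fesCmp : List Int → List Int → List Int → List Int
  | [], result, _ => result
  | k :: ks, result, tmp =>
    if PySem.List.pyGetD tmp k 0 < PySem.List.pyGetD result k 0 then fesCmp ks tmp tmp
    else if PySem.List.pyGetD result k 0 < PySem.List.pyGetD tmp k 0 then result
    else fesCmp ks result tmp

def four_element_sum (A : List Int) : List Int :=
  let n : Int := A.length
  let st := (PySem.List.pyRange 0 n 1).foldl (fun st i =>
    (PySem.List.pyRange (i+1) n 1).foldl (fun (st : PySem.Dict Int (List Int) × List Int) j =>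
      let hm := st.1
      let result := st.2
      let temp := PySem.List.pyGetD A i 0 + PySem.List.pyGetD A j 0
      if ¬ hm.contains temp then (hm.insert temp [i, j], result)
      else
        let l := hm.getD temp []
        let l' := if i ∉ l ∧ j ∉ l ∧ l.length ≤ 2 then l ++ [i, j] else l
        if l'.length = 4 then
          if result = [] then (hm.insert temp l', l')
          else (hm.insert temp l', fesCmp (PySem.List.pyRange 0 4 1) result l')
        else (hm.insert temp l', result)) st) ((PySem.Dict.empty : PySem.Dict Int (List Int)), ([] : List Int))
  st.2

-- ===== PORT B =====
-- B's inner scan: first pair after the anchor sharing no index with it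
def fesFindDisj (p0 : Int × Int) : List (Int × Int) → Option (Int × Int)
  | [] => none
  | q :: qs =>
    if q.1 ≠ p0.1 ∧ q.1 ≠ p0.2 ∧ q.2 ≠ p0.1 ∧ q.2 ≠ p0.2 then some q
    else fesFindDisj p0 qs

def four_element_sum_alt (A : List Int) : List Int :=
  let n : Int := A.length
  let pairs := (PySem.List.pyRange 0 n 1).foldl (fun d i =>
    (PySem.List.pyRange (i+1) n 1).foldl (fun (d : PySem.Dict Int (List (Int × Int))) j =>
      d.modify (PySem.List.pyGetD A i 0 + PySem.List.pyGetD A j 0) [] (fun v => v ++ [(i, j)])) d)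
    (PySem.Dict.empty : PySem.Dict Int (List (Int × Int)))
  let candidates := pairs.values.foldl (fun (cs : List (List Int)) plist =>
    match plist with
    | [] => cs
    | p0 :: rest =>
      match fesFindDisj p0 rest with
      | some q => cs ++ [[p0.1, p0.2, q.1, q.2]]
      | none => cs) []
  if candidates.isEmpty then [] else (PySem.List.min? candidates (fun x => x)).getD []

-- ===== PRECONDITION & SPEC =====
def Spec_four_element_sum (A : List Int) (out : List Int) : Prop := out = four_element_sum_alt A
instance (A : List Int) (out : List Int) : Decidable (Spec_four_element_sum A out) := by unfold Spec_four_element_sum; infer_instance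

-- ===== CLAIM (what is proved, stated in full; the proofs are below) =====
def Claim_equal_four_element_sum : Prop := ∀ (A : List Int), Dom_four_element_sum A → Spec_four_element_sum A (four_element_sum A)

-- ===== LEMMAS AND PROOFS =====

-- abstract versions of the two loops, over the flattened (i, j) pair list
def pvK (A : List Int) (p : Int × Int) : Int :=
  PySem.List.pyGetD A p.1 0 + PySem.List.pyGetD A p.2 0

def pvPairs (A : List Int) : List (Int × Int) :=
  (PySem.List.pyRange 0 (A.length : Int) 1).flatMap
    (fun i => (PySem.List.pyRange (i+1) (A.length : Int) 1).map (fun j => (i, j)))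

def pvStepA (k : Int × Int → Int) (st : PySem.Dict Int (List Int) × List Int) (p : Int × Int) :
    PySem.Dict Int (List Int) × List Int :=
  let hm := st.1
  let result := st.2
  let temp := k p
  if ¬ hm.contains temp then (hm.insert temp [p.1, p.2], result)
  else
    let l := hm.getD temp []
    let l' := if p.1 ∉ l ∧ p.2 ∉ l ∧ l.length ≤ 2 then l ++ [p.1, p.2] else l
    if l'.length = 4 then
      if result = [] then (hm.insert temp l', l')
      else (hm.insert temp l', fesCmp (PySem.List.pyRange 0 4 1) result l')
    else (hm.insert temp l', result)

def pvGrp (k : Int × Int → Int) (ps : List (Int × Int)) (s : Int) : List (Int × Int) :=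
  ps.filter (fun p => k p == s)

def pvEnc : List (Int × Int) → List Int
  | [] => []
  | p0 :: rest =>
    match fesFindDisj p0 rest with
    | none => [p0.1, p0.2]
    | some q => [p0.1, p0.2, q.1, q.2]

def pvCandOf : List (Int × Int) → Option (List Int)
  | [] => none
  | p0 :: rest => (fesFindDisj p0 rest).map (fun q => [p0.1, p0.2, q.1, q.2])

def pvCands (k : Int × Int → Int) (ps : List (Int × Int)) : List (List Int) :=
  (PySem.Set.ofList (ps.map k)).filterMap (fun s => pvCandOf (pvGrp k ps s))

def pvMerge (res c : List Int) : List Int := if res = [] then c else min res c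

-- A's result as a fold of pvStepA
theorem pvA_flat (A : List Int) :
    four_element_sum A = ((pvPairs A).foldl (pvStepA (pvK A)) (PySem.Dict.empty, [])).2 := by
  unfold four_element_sum pvPairs
  simp only [List.foldl_flatMap, List.foldl_map]
  rfl

-- B's grouping dict, characterised
def pvDictB (A : List Int) : PySem.Dict Int (List (Int × Int)) :=
  (pvPairs A).foldl (fun d p => d.modify (pvK A p) [] (fun v => v ++ [p])) PySem.Dict.empty

theorem pvB_dict_flat (A : List Int) :
    ((PySem.List.pyRange 0 (A.length : Int) 1).foldl (fun d i =>
      (PySem.List.pyRange (i+1) (A.length : Int) 1).foldl (fun (d : PySem.Dict Int (List (Int × Int))) j =>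
        d.modify (PySem.List.pyGetD A i 0 + PySem.List.pyGetD A j 0) [] (fun v => v ++ [(i, j)])) d)
      (PySem.Dict.empty : PySem.Dict Int (List (Int × Int)))) = pvDictB A := by
  unfold pvDictB pvPairs
  simp only [List.foldl_flatMap, List.foldl_map]
  rfl

theorem pvDictB_getD (A : List Int) (s : Int) :
    (pvDictB A).getD s [] = pvGrp (pvK A) (pvPairs A) s := by
  unfold pvDictB pvGrp
  have h : ∀ (ps : List (Int × Int)) (d : PySem.Dict Int (List (Int × Int))),
      (ps.foldl (fun d p => d.modify (pvK A p) [] (fun v => v ++ [p])) d)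
        = ((ps.map (fun p => (pvK A p, p))).foldl (fun d q => d.modify q.1 [] (fun v => v ++ [q.2])) d) := by
    intro ps d; rw [List.foldl_map]
  rw [h, PySem.Dict.getD_foldl_modify_append]
  simp [List.filter_map, Function.comp_def]

theorem pvDictB_keys (A : List Int) :
    (pvDictB A).keys = PySem.Set.ofList ((pvPairs A).map (pvK A)) := by
  unfold pvDictB
  rw [PySem.Dict.keys_foldl_modify_key]
  rfl

theorem pvDictB_nodup (A : List Int) : (pvDictB A).keys.Nodup := by
  unfold pvDictB
  exact PySem.Dict.nodup_keys_foldl_modify_key _ _ _ _ _ (by simp)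

theorem pvCandFold (vls : List (List (Int × Int))) (cs : List (List Int)) :
    (vls.foldl (fun (cs : List (List Int)) plist =>
      match plist with
      | [] => cs
      | p0 :: rest =>
        match fesFindDisj p0 rest with
        | some q => cs ++ [[p0.1, p0.2, q.1, q.2]]
        | none => cs) cs) = cs ++ vls.filterMap pvCandOf := by
  induction vls generalizing cs with
  | nil => simp
  | cons plist t ih =>
    simp only [List.foldl_cons, List.filterMap_cons]
    cases plist with
    | nil => simpa [pvCandOf] using ih cs
    | cons p0 rest =>
      cases hfd : fesFindDisj p0 rest <;> simp [pvCandOf, hfd, ih]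

-- B's result in terms of pvCands
theorem pvB_eq (A : List Int) :
    four_element_sum_alt A =
      (if (pvCands (pvK A) (pvPairs A)).isEmpty then []
       else (PySem.List.min? (pvCands (pvK A) (pvPairs A)) (fun x => x)).getD []) := by
  simp only [four_element_sum_alt]
  rw [pvB_dict_flat, pvCandFold, PySem.Dict.values_eq_map_keys _ (pvDictB_nodup A) [],
      List.filterMap_map, pvDictB_keys]
  have h : ((PySem.Set.ofList ((pvPairs A).map (pvK A))).filterMap
      (pvCandOf ∘ fun s => (pvDictB A).getD s [])) = pvCands (pvK A) (pvPairs A) := by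
    unfold pvCands
    apply List.filterMap_congr
    intro s _
    simp [Function.comp_def, pvDictB_getD]
  rw [h]
  simp

-- fesCmp on four-element lists is lexicographic min
theorem fesCmp_eq_min (res tmp : List Int) (hr : res.length = 4) (ht : tmp.length = 4) :
    fesCmp (PySem.List.pyRange 0 4 1) res tmp = min res tmp := by
  obtain ⟨a, res, rfl⟩ : ∃ x t, res = x :: t := by cases res <;> simp_all
  obtain ⟨b, res, rfl⟩ : ∃ x t, res = x :: t := by cases res <;> simp_all
  obtain ⟨c, res, rfl⟩ : ∃ x t, res = x :: t := by cases res <;> simp_all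
  obtain ⟨d, res, rfl⟩ : ∃ x t, res = x :: t := by cases res <;> simp_all
  obtain rfl : res = [] := by cases res <;> simp_all
  obtain ⟨e, tmp, rfl⟩ : ∃ x t, tmp = x :: t := by cases tmp <;> simp_all
  obtain ⟨f, tmp, rfl⟩ : ∃ x t, tmp = x :: t := by cases tmp <;> simp_all
  obtain ⟨g, tmp, rfl⟩ : ∃ x t, tmp = x :: t := by cases tmp <;> simp_all
  obtain ⟨h, tmp, rfl⟩ : ∃ x t, tmp = x :: t := by cases tmp <;> simp_all
  obtain rfl : tmp = [] := by cases tmp <;> simp_all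
  have hrange : PySem.List.pyRange 0 4 1 = [0,1,2,3] := by decide
  rw [hrange, min_comm, min_def_lt]
  simp only [fesCmp, PySem.List.pyGetD, PySem.List.pyIdx?]
  norm_num
  split_ifs <;> simp_all [List.cons_lt_cons_iff] <;> omega


-- merge fold facts
theorem pvMerge_ne_nil {r x : List Int} (hx : x ≠ []) : pvMerge r x ≠ [] := by
  unfold pvMerge; split
  · exact hx
  · rcases min_choice r x with h | h <;> rw [h] <;> assumption

theorem foldl_pvMerge_ne_nil {l : List (List Int)} (hl : ∀ x ∈ l, x ≠ ([] : List Int)) {r : List Int}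
    (h : r ≠ [] ∨ l ≠ []) : l.foldl pvMerge r ≠ [] := by
  induction l generalizing r with
  | nil => simpa using h
  | cons x t ih =>
    simp only [List.foldl_cons]
    exact ih (fun y hy => hl y (List.mem_cons_of_mem _ hy)) (Or.inl (pvMerge_ne_nil (hl x (List.mem_cons_self))))

theorem foldl_pvMerge_mem (l : List (List Int)) (r : List Int) :
    l.foldl pvMerge r = r ∨ l.foldl pvMerge r ∈ l := by
  induction l generalizing r with
  | nil => simp
  | cons x t ih =>
    simp only [List.foldl_cons]
    rcases ih (pvMerge r x) with h | h
    · rw [h]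
      unfold pvMerge; split
      · exact Or.inr (List.mem_cons_self)
      · rcases min_choice r x with h' | h' <;> rw [h']
        · exact Or.inl rfl
        · exact Or.inr (List.mem_cons_self)
    · exact Or.inr (List.mem_cons_of_mem _ h)

theorem pvMerge_le {r x : List Int} (hx : x ≠ []) : pvMerge r x ≤ x := by
  unfold pvMerge; split
  · exact le_refl x
  · exact min_le_right r x

theorem foldl_pvMerge_le_init {l : List (List Int)} (hl : ∀ x ∈ l, x ≠ ([] : List Int))
    {r : List Int} (hr : r ≠ []) : l.foldl pvMerge r ≤ r := by
  induction l generalizing r with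
  | nil => simp
  | cons x t ih =>
    simp only [List.foldl_cons]
    refine le_trans (ih (fun y hy => hl y (List.mem_cons_of_mem _ hy)) (pvMerge_ne_nil (hl x List.mem_cons_self))) ?_
    unfold pvMerge; split
    · exact absurd ‹r = []› hr
    · exact min_le_left r x

theorem foldl_pvMerge_le {l : List (List Int)} (hl : ∀ x ∈ l, x ≠ ([] : List Int))
    {c : List Int} (hc : c ∈ l) (r : List Int) : l.foldl pvMerge r ≤ c := by
  induction l generalizing r with
  | nil => simp at hc
  | cons x t ih =>
    simp only [List.foldl_cons]
    rcases List.mem_cons.1 hc with rfl | hc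
    · exact le_trans (foldl_pvMerge_le_init (fun y hy => hl y (List.mem_cons_of_mem _ hy))
        (pvMerge_ne_nil (hl c List.mem_cons_self))) (pvMerge_le (hl c List.mem_cons_self))
    · exact ih (fun y hy => hl y (List.mem_cons_of_mem _ hy)) hc _

theorem pvMerge_right_comm {a b : List Int} (ha : a ≠ []) (hb : b ≠ []) (r : List Int) :
    pvMerge (pvMerge r a) b = pvMerge (pvMerge r b) a := by
  by_cases hr : r = []
  · subst hr
    have h1 : pvMerge ([] : List Int) a = a := by simp [pvMerge]
    have h2 : pvMerge ([] : List Int) b = b := by simp [pvMerge]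
    rw [h1, h2]
    simp only [pvMerge, if_neg ha, if_neg hb]
    exact min_comm a b
  · simp only [pvMerge, if_neg hr]
    have h1 : min r a ≠ [] := by rcases min_choice r a with h | h <;> rw [h] <;> assumption
    have h2 : min r b ≠ [] := by rcases min_choice r b with h | h <;> rw [h] <;> assumption
    rw [if_neg h1, if_neg h2, min_right_comm]

theorem foldl_pvMerge_pull {l2 : List (List Int)} (hl2 : ∀ x ∈ l2, x ≠ ([] : List Int))
    {c : List Int} (hc : c ≠ []) (r : List Int) :
    l2.foldl pvMerge (pvMerge r c) = pvMerge (l2.foldl pvMerge r) c := by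
  induction l2 generalizing r with
  | nil => simp
  | cons x t ih =>
    simp only [List.foldl_cons]
    rw [pvMerge_right_comm hc (hl2 x List.mem_cons_self) r,
        ih (fun y hy => hl2 y (List.mem_cons_of_mem _ hy))]

theorem foldl_pvMerge_insert {l1 l2 : List (List Int)} (hl2 : ∀ x ∈ l2, x ≠ ([] : List Int))
    {c : List Int} (hc : c ≠ []) (r : List Int) :
    (l1 ++ c :: l2).foldl pvMerge r = pvMerge ((l1 ++ l2).foldl pvMerge r) c := by
  rw [List.foldl_append, List.foldl_append, List.foldl_cons, foldl_pvMerge_pull hl2 hc]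

-- filterMap with one key's value changed from none to some
theorem filterMap_update_one {α β : Type} [DecidableEq α] (u : List α) (F G : α → Option β) (s : α)
    (hu : u.Nodup) (hs : s ∈ u) (hFG : ∀ t ∈ u, t ≠ s → F t = G t)
    (hF : F s = none) {c : β} (hG : G s = some c) :
    ∃ l1 l2, u.filterMap F = l1 ++ l2 ∧ u.filterMap G = l1 ++ c :: l2 := by
  induction u with
  | nil => simp at hs
  | cons x t ih =>
    rcases List.mem_cons.1 hs with rfl | hs'
    · refine ⟨[], t.filterMap F, ?_, ?_⟩
      · simp [List.filterMap_cons, hF]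
      · have : t.filterMap F = t.filterMap G := by
          apply List.filterMap_congr
          intro y hy
          exact hFG y (List.mem_cons_of_mem _ hy) (fun h => (List.nodup_cons.1 hu).1 (h ▸ hy))
        simp [List.filterMap_cons, hG, this]
    · have hxs : x ≠ s := fun h => (List.nodup_cons.1 hu).1 (h ▸ hs')
      obtain ⟨l1, l2, h1, h2⟩ := ih (List.nodup_cons.1 hu).2 hs'
        (fun y hy => hFG y (List.mem_cons_of_mem _ hy))
      rw [List.filterMap_cons, List.filterMap_cons, hFG x List.mem_cons_self hxs]
      cases hGx : G x with
      | none => exact ⟨l1, l2, h1, h2⟩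
      | some v => exact ⟨v :: l1, l2, by simp [h1], by simp [h2]⟩

-- every candidate has four entries
theorem pvCandOf_len {g : List (Int × Int)} {c : List Int} (h : pvCandOf g = some c) :
    c.length = 4 := by
  cases g with
  | nil => simp [pvCandOf] at h
  | cons p0 rest =>
    cases hfd : fesFindDisj p0 rest <;> simp [pvCandOf, hfd] at h
    subst h; rfl

theorem pvCands_len (k : Int × Int → Int) (ps : List (Int × Int)) :
    ∀ c ∈ pvCands k ps, c.length = 4 := by
  intro c hc
  obtain ⟨s, _, hs⟩ := List.mem_filterMap.1 hc
  exact pvCandOf_len hs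

theorem pvCands_ne_nil (k : Int × Int → Int) (ps : List (Int × Int)) :
    ∀ c ∈ pvCands k ps, c ≠ ([] : List Int) := by
  intro c hc h
  have := pvCands_len k ps c hc
  rw [h] at this
  simp at this

theorem fesFindDisj_append (p0 : Int × Int) (l : List (Int × Int)) (p : Int × Int) :
    fesFindDisj p0 (l ++ [p]) = (fesFindDisj p0 l).or
      (if p.1 ≠ p0.1 ∧ p.1 ≠ p0.2 ∧ p.2 ≠ p0.1 ∧ p.2 ≠ p0.2 then some p else none) := by
  induction l with
  | nil => simp [fesFindDisj]
  | cons q qs ih =>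
    simp only [List.cons_append, fesFindDisj]
    split
    · rfl
    · exact ih

theorem pvGrp_append_self (k : Int × Int → Int) (ps : List (Int × Int)) (p : Int × Int) :
    pvGrp k (ps ++ [p]) (k p) = pvGrp k ps (k p) ++ [p] := by
  simp [pvGrp, List.filter_append]

theorem pvGrp_append_ne (k : Int × Int → Int) (ps : List (Int × Int)) (p : Int × Int)
    {s : Int} (hs : s ≠ k p) : pvGrp k (ps ++ [p]) s = pvGrp k ps s := by
  simp [pvGrp, List.filter_append, (Ne.symm hs)]

theorem pvGrp_ne_nil (k : Int × Int → Int) {ps : List (Int × Int)} {s : Int}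
    (h : s ∈ ps.map k) : pvGrp k ps s ≠ [] := by
  obtain ⟨p', hp', rfl⟩ := List.mem_map.1 h
  exact List.ne_nil_of_mem (List.mem_filter.2 ⟨hp', by simp⟩)

theorem pvGrp_nil (k : Int × Int → Int) {ps : List (Int × Int)} {s : Int}
    (h : s ∉ ps.map k) : pvGrp k ps s = [] := by
  refine List.filter_eq_nil_iff.2 ?_
  intro p' hp' hb
  exact h (by simpa using (List.mem_map.2 ⟨p', hp', by simpa using hb⟩))

theorem pvOfList_append_mem {l : List Int} {x : Int} (h : x ∈ l) :
    PySem.Set.ofList (l ++ [x]) = PySem.Set.ofList l := by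
  show (l ++ [x]).foldl PySem.Set.add PySem.Set.empty = _
  rw [List.foldl_append]
  simp only [List.foldl_cons, List.foldl_nil]
  exact PySem.Set.add_of_mem ((PySem.Set.mem_ofList l x).2 h)

theorem pvOfList_append_not_mem {l : List Int} {x : Int} (h : x ∉ l) :
    PySem.Set.ofList (l ++ [x]) = PySem.Set.ofList l ++ [x] := by
  show (l ++ [x]).foldl PySem.Set.add PySem.Set.empty = _
  rw [List.foldl_append]
  simp only [List.foldl_cons, List.foldl_nil]
  exact PySem.Set.add_of_not_mem (fun hm => h ((PySem.Set.mem_ofList l x).1 hm))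

-- the main invariant for A's loop
theorem pvMainInv (k : Int × Int → Int) (ps : List (Int × Int)) :
    (∀ s, ((ps.foldl (pvStepA k) (PySem.Dict.empty, [])).1.getD s [] = pvEnc (pvGrp k ps s))) ∧
    (∀ s, ((ps.foldl (pvStepA k) (PySem.Dict.empty, [])).1.contains s = !(pvGrp k ps s).isEmpty)) ∧
    (ps.foldl (pvStepA k) (PySem.Dict.empty, [])).2 = (pvCands k ps).foldl pvMerge [] := by
  induction ps using List.reverseRecOn with
  | nil =>
    refine ⟨fun s => ?_, fun s => ?_, ?_⟩
    · simp [pvGrp, pvEnc]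
    · simp [pvGrp]
    · simp [pvCands, pvGrp]
  | append_singleton ps p ih =>
    obtain ⟨ih1, ih2, ih3⟩ := ih
    simp only [List.foldl_append, List.foldl_cons, List.foldl_nil]
    set st := ps.foldl (pvStepA k) ((PySem.Dict.empty : PySem.Dict Int (List Int)), ([] : List Int)) with hst
    by_cases hmem : k p ∈ ps.map k
    case neg =>
      have hg : pvGrp k ps (k p) = [] := pvGrp_nil k hmem
      have hcont : st.1.contains (k p) = false := by rw [ih2]; simp [hg]
      have hstep : pvStepA k st p = (st.1.insert (k p) [p.1, p.2], st.2) := by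
        simp only [pvStepA]
        rw [hcont]
        simp
      have hcands : pvCands k (ps ++ [p]) = pvCands k ps := by
        unfold pvCands
        rw [List.map_append, List.map_cons, List.map_nil, pvOfList_append_not_mem hmem,
            List.filterMap_append]
        have h2 : List.filterMap (fun s => pvCandOf (pvGrp k (ps ++ [p]) s)) [k p] = [] := by
          simp only [List.filterMap_cons, List.filterMap_nil, pvGrp_append_self, hg,
            List.nil_append]
          rfl
        rw [h2, List.append_nil]
        apply List.filterMap_congr
        intro t ht
        have htm : t ∈ ps.map k := (PySem.Set.mem_ofList _ _).1 ht
        have htne : t ≠ k p := fun h => hmem (h ▸ htm)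
        rw [pvGrp_append_ne k ps p htne]
      rw [hstep]
      refine ⟨fun s => ?_, fun s => ?_, ?_⟩
      · by_cases hs : s = k p
        · subst hs
          rw [PySem.Dict.getD_insert_self, pvGrp_append_self, hg, List.nil_append]
          rfl
        · rw [PySem.Dict.getD_insert, if_neg hs, pvGrp_append_ne k ps p hs]
          exact ih1 s
      · rw [PySem.Dict.contains_insert]
        by_cases hs : s = k p
        · subst hs
          rw [pvGrp_append_self]
          simp
        · have hb : (s == k p) = false := by simp [hs]
          rw [hb, Bool.false_or, pvGrp_append_ne k ps p hs]
          exact ih2 s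
      · rw [hcands]
        exact ih3
    case pos =>
      have hgne : pvGrp k ps (k p) ≠ [] := pvGrp_ne_nil k hmem
      obtain ⟨p0, rest, hgrp⟩ : ∃ p0 rest, pvGrp k ps (k p) = p0 :: rest := by
        cases h : pvGrp k ps (k p) with
        | nil => exact absurd h hgne
        | cons a b => exact ⟨a, b, rfl⟩
      have hcont : st.1.contains (k p) = true := by rw [ih2]; simp [hgrp]
      have hl : st.1.getD (k p) [] = pvEnc (p0 :: rest) := by rw [ih1, hgrp]
      have hofl : PySem.Set.ofList ((ps ++ [p]).map k) = PySem.Set.ofList (ps.map k) := by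
        rw [List.map_append, List.map_cons, List.map_nil, pvOfList_append_mem hmem]
      -- congruence of candidates away from k p
      have hcongr : ∀ t ∈ PySem.Set.ofList (ps.map k), t ≠ k p →
          pvCandOf (pvGrp k (ps ++ [p]) t) = pvCandOf (pvGrp k ps t) := by
        intro t _ htne
        rw [pvGrp_append_ne k ps p htne]
      cases hfd : fesFindDisj p0 rest with
      | some q =>
        have hlv : pvEnc (p0 :: rest) = [p0.1, p0.2, q.1, q.2] := by
          simp [pvEnc, hfd]
        have hc0 : pvCandOf (pvGrp k ps (k p)) = some [p0.1, p0.2, q.1, q.2] := by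
          rw [hgrp]; simp [pvCandOf, hfd]
        have hc0mem : [p0.1, p0.2, q.1, q.2] ∈ pvCands k ps :=
          List.mem_filterMap.2 ⟨k p, (PySem.Set.mem_ofList _ _).2 hmem, hc0⟩
        have hresne : st.2 ≠ [] := by
          rw [ih3]
          exact foldl_pvMerge_ne_nil (pvCands_ne_nil k ps) (Or.inr (List.ne_nil_of_mem hc0mem))
        have hreslen : st.2.length = 4 := by
          rcases foldl_pvMerge_mem (pvCands k ps) [] with h | h
          · rw [ih3] at hresne; exact absurd (ih3.symm ▸ h) hresne
          · exact pvCands_len k ps _ (ih3 ▸ h)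
        have hstep : pvStepA k st p =
            (st.1.insert (k p) (pvEnc (p0 :: rest)), st.2) := by
          simp only [pvStepA]
          rw [hcont]
          simp only [hl, hlv]
          have hcondf : ¬ (p.1 ∉ [p0.1, p0.2, q.1, q.2] ∧ p.2 ∉ [p0.1, p0.2, q.1, q.2] ∧
              ([p0.1, p0.2, q.1, q.2] : List Int).length ≤ 2) := by
            intro ⟨_, _, hlen⟩
            simp at hlen
          rw [if_neg hcondf]
          norm_num [hresne]
          rw [fesCmp_eq_min st.2 _ hreslen rfl]
          have hle : st.2 ≤ [p0.1, p0.2, q.1, q.2] := by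
            rw [ih3]
            exact foldl_pvMerge_le (pvCands_ne_nil k ps) hc0mem []
          rw [min_eq_left hle]
        rw [hstep]
        refine ⟨fun s => ?_, fun s => ?_, ?_⟩
        · by_cases hs : s = k p
          · subst hs
            rw [PySem.Dict.getD_insert_self, pvGrp_append_self, hgrp]
            simp [pvEnc, List.cons_append, fesFindDisj_append, hfd]
          · rw [PySem.Dict.getD_insert, if_neg hs, pvGrp_append_ne k ps p hs]
            exact ih1 s
        · rw [PySem.Dict.contains_insert]
          by_cases hs : s = k p
          · subst hs
            rw [pvGrp_append_self]
            simp
          · have hb : (s == k p) = false := by simp [hs]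
            rw [hb, Bool.false_or, pvGrp_append_ne k ps p hs]
            exact ih2 s
        · have hcands : pvCands k (ps ++ [p]) = pvCands k ps := by
            unfold pvCands
            rw [hofl]
            apply List.filterMap_congr
            intro t ht
            by_cases hts : t = k p
            · subst hts
              rw [pvGrp_append_self, hgrp]
              simp [pvCandOf, List.cons_append, fesFindDisj_append, hfd]
            · exact hcongr t ht hts
          rw [hcands]
          exact ih3
      | none =>
        have hlv : pvEnc (p0 :: rest) = [p0.1, p0.2] := by simp [pvEnc, hfd]
        by_cases hdj : p.1 ≠ p0.1 ∧ p.1 ≠ p0.2 ∧ p.2 ≠ p0.1 ∧ p.2 ≠ p0.2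
        · -- a new candidate completes at key k p
          have hcnew : pvCandOf (pvGrp k (ps ++ [p]) (k p)) = some [p0.1, p0.2, p.1, p.2] := by
            rw [pvGrp_append_self, hgrp]
            simp [pvCandOf, List.cons_append, fesFindDisj_append, hfd, hdj]
          have hcold : pvCandOf (pvGrp k ps (k p)) = none := by
            rw [hgrp]
            simp [pvCandOf, hfd]
          have hstep : pvStepA k st p = (st.1.insert (k p) [p0.1, p0.2, p.1, p.2],
              pvMerge st.2 [p0.1, p0.2, p.1, p.2]) := by
            simp only [pvStepA]
            rw [hcont]
            simp only [hl, hlv]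
            have hcondt : (p.1 ∉ ([p0.1, p0.2] : List Int) ∧ p.2 ∉ ([p0.1, p0.2] : List Int) ∧
                ([p0.1, p0.2] : List Int).length ≤ 2) := by
              obtain ⟨h1, h2, h3, h4⟩ := hdj
              refine ⟨?_, ?_, by simp⟩ <;> simp [h1, h2, h3, h4]
            rw [if_pos hcondt]
            by_cases hres : st.2 = []
            · simp [hres, pvMerge]
            · have hreslen : st.2.length = 4 := by
                rcases foldl_pvMerge_mem (pvCands k ps) [] with h | h
                · exact absurd (ih3.symm ▸ h : st.2 = []) hres
                · exact pvCands_len k ps _ (ih3 ▸ h)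
              norm_num [hres]
              rw [fesCmp_eq_min st.2 _ hreslen rfl]
              simp [pvMerge, hres, min_comm]
          rw [hstep]
          refine ⟨fun s => ?_, fun s => ?_, ?_⟩
          · by_cases hs : s = k p
            · subst hs
              rw [PySem.Dict.getD_insert_self, pvGrp_append_self, hgrp]
              simp [pvEnc, List.cons_append, fesFindDisj_append, hfd, hdj]
            · rw [PySem.Dict.getD_insert, if_neg hs, pvGrp_append_ne k ps p hs]
              exact ih1 s
          · rw [PySem.Dict.contains_insert]
            by_cases hs : s = k p
            · subst hs
              rw [pvGrp_append_self]
              simp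
            · have hb : (s == k p) = false := by simp [hs]
              rw [hb, Bool.false_or, pvGrp_append_ne k ps p hs]
              exact ih2 s
          · obtain ⟨l1, l2, hF, hG⟩ :
                ∃ l1 l2, pvCands k ps = l1 ++ l2 ∧
                  pvCands k (ps ++ [p]) = l1 ++ [p0.1, p0.2, p.1, p.2] :: l2 := by
              unfold pvCands
              rw [hofl]
              exact filterMap_update_one _ _ _ (k p) (PySem.Set.nodup_ofList _)
                ((PySem.Set.mem_ofList _ _).2 hmem)
                (fun t ht htn => (hcongr t ht htn).symm) hcold hcnew
            have hl2 : ∀ x ∈ l2, x ≠ ([] : List Int) := by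
              intro x hx
              exact pvCands_ne_nil k (ps ++ [p]) x
                (hG ▸ (List.mem_append.2 (Or.inr (List.mem_cons_of_mem _ hx))))
            rw [hG, foldl_pvMerge_insert hl2 (by simp) [], ← hF, ← ih3]
        · -- no new candidate: the pair shares an index with the anchor
          have hstep : pvStepA k st p = (st.1.insert (k p) [p0.1, p0.2], st.2) := by
            simp only [pvStepA]
            rw [hcont]
            simp only [hl, hlv]
            have hcondf : ¬ (p.1 ∉ ([p0.1, p0.2] : List Int) ∧ p.2 ∉ ([p0.1, p0.2] : List Int) ∧
                ([p0.1, p0.2] : List Int).length ≤ 2) := by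
              intro ⟨h1, h2, _⟩
              apply hdj
              simp only [List.mem_cons, List.not_mem_nil, or_false, not_or] at h1 h2
              exact ⟨h1.1, h1.2, h2.1, h2.2⟩
            rw [if_neg hcondf]
            norm_num
          rw [hstep]
          refine ⟨fun s => ?_, fun s => ?_, ?_⟩
          · by_cases hs : s = k p
            · subst hs
              rw [PySem.Dict.getD_insert_self, pvGrp_append_self, hgrp]
              simp [pvEnc, List.cons_append, fesFindDisj_append, hfd, hdj]
            · rw [PySem.Dict.getD_insert, if_neg hs, pvGrp_append_ne k ps p hs]
              exact ih1 s
          · rw [PySem.Dict.contains_insert]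
            by_cases hs : s = k p
            · subst hs
              rw [pvGrp_append_self]
              simp
            · have hb : (s == k p) = false := by simp [hs]
              rw [hb, Bool.false_or, pvGrp_append_ne k ps p hs]
              exact ih2 s
          · have hcands : pvCands k (ps ++ [p]) = pvCands k ps := by
              unfold pvCands
              rw [hofl]
              apply List.filterMap_congr
              intro t ht
              by_cases hts : t = k p
              · subst hts
                rw [pvGrp_append_self, hgrp]
                simp [pvCandOf, List.cons_append, fesFindDisj_append, hfd, hdj]
              · exact hcongr t ht hts
            rw [hcands]
            exact ih3
    

theorem foldl_pvMerge_eq_foldl_min (t : List (List Int)) (c : List Int) (hc : c ≠ [])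
    (ht : ∀ x ∈ t, x ≠ ([] : List Int)) : t.foldl pvMerge c = t.foldl min c := by
  induction t generalizing c with
  | nil => rfl
  | cons x xs ih =>
    simp only [List.foldl_cons]
    have h1 : pvMerge c x = min c x := by simp [pvMerge, hc]
    have h2 : min c x ≠ [] := by
      rcases min_choice c x with h | h <;> rw [h]
      · exact hc
      · exact ht x List.mem_cons_self
    rw [h1, ih (min c x) h2 (fun y hy => ht y (List.mem_cons_of_mem _ hy))]

-- ===== VERDICT (by name: the statement is the Claim_ definition above) =====
theorem four_element_sum_spec : Claim_equal_four_element_sum := by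
  intro A _
  unfold Spec_four_element_sum
  rw [pvA_flat, pvB_eq, (pvMainInv (pvK A) (pvPairs A)).2.2]
  cases hcase : pvCands (pvK A) (pvPairs A) with
  | nil => simp
  | cons c t =>
    have hne : ∀ x ∈ c :: t, x ≠ ([] : List Int) := by
      rw [← hcase]
      exact pvCands_ne_nil (pvK A) (pvPairs A)
    rw [show (PySem.List.min? (c :: t) fun x => x) = some (t.foldl min c) from by
      have h := PySem.List.min?_id_cons c t
      convert h using 2]
    simp only [List.isEmpty_cons, Bool.false_eq_true, if_false, Option.getD_some, List.foldl_cons]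
    have h0 : pvMerge [] c = c := by simp [pvMerge]
    rw [h0]
    exact foldl_pvMerge_eq_foldl_min t c (hne c List.mem_cons_self)
      (fun y hy => hne y (List.mem_cons_of_mem _ hy))
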